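-- pv_equiv track=rewrite | github.com/0choki0/algo | progrmmers/피자나눠먹기(2)/sol.py | solution
-- ===== SOURCE A (Python) =====
-- def solution(n):
--     # 6과 n의 최소공배수를 6으로 나눈 몫
--     lcm = 1
--     answer = 0
--     while answer == 0:
--         if lcm % 6 == 0 and lcm % n == 0:
--             answer = lcm // 6
--             break
--         else:
--             lcm += 1
--
--     return answer
-- ===== SOURCE B (Python) =====
-- def solution(n):
--     # pizzas = |n| / gcd(|n|, 6), computed with Euclid's algorithm (O(log n))
--     a = abs(n)
--     g, b = a, 6
--     while b:
--         g, b = b, g % b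
--     return a // g
-- ===== Notes on version B (the rewrite author's own statement) =====
-- stated objective: faster
-- what changed: Replaces the linear scan for the least common multiple of 6 and n by Euclid's gcd algorithm and the identity lcm(6,n)/6 = |n|/gcd(|n|,6).
-- outside the precondition, e.g. on solution(0): A raises ZeroDivisionError, B returns 0
import Mathlib
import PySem

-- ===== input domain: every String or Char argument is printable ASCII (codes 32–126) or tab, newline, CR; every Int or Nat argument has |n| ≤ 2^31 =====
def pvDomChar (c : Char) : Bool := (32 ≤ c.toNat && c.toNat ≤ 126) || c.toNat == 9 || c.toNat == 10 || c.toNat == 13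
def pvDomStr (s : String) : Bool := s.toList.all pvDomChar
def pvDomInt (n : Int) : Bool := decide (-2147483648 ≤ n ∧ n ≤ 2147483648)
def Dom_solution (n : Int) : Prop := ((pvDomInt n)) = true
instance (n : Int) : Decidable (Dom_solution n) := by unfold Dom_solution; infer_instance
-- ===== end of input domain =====

-- B replaces A's linear search for the least common multiple of 6 and n by Euclid's gcd loop: |n| // gcd(|n|, 6).


-- ===== PORT A =====
-- the 'while answer == 0' loop; fuel 6*|n| is enough since the loop stops at lcm(6,n) ≤ 6*|n|
def solutionLoop (fuel : Nat) (n lcm : Int) : Int :=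
  match fuel with
  | 0 => 0
  | f + 1 =>
    if PySem.Int.mod lcm 6 = 0 ∧ PySem.Int.mod lcm n = 0 then
      PySem.Int.floordiv lcm 6
    else
      solutionLoop f n (lcm + 1)

def solution (n : Int) : Int := solutionLoop (6 * n.natAbs) n 1

-- ===== PORT B =====
-- Euclid's loop: g, b = b, g % b until b == 0
def gcdLoop (g b : Int) : Int :=
  if h : b = 0 then g else gcdLoop b (PySem.Int.mod g b)
termination_by b.natAbs
decreasing_by
  rcases lt_or_gt_of_ne h with hb | hb
  · have := PySem.Int.mod_neg_bounds (a := g) hb; omega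
  · have h1 := PySem.Int.mod_nonneg (a := g) hb
    have h2 := PySem.Int.mod_lt (a := g) hb; omega

def solution_alt (n : Int) : Int :=
  let a : Int := |n|
  PySem.Int.floordiv a (gcdLoop a 6)

-- ===== PRECONDITION & SPEC =====
-- Pre_ excludes exactly n = 0, where A raises ZeroDivisionError (lcm % 0).
def Pre_solution (n : Int) : Prop := n ≠ 0
instance (n : Int) : Decidable (Pre_solution n) := by unfold Pre_solution; infer_instance
def pvWitness_solution : Int := (10)

def Spec_solution (n : Int) (out : Int) : Prop := out = solution_alt n
instance (n : Int) (out : Int) : Decidable (Spec_solution n out) := by unfold Spec_solution; infer_instance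

-- ===== CLAIM (what is proved, stated in full; the proofs are below) =====
def Claim_equal_solution : Prop := ∀ (n : Int), Dom_solution n → Pre_solution n → Spec_solution n (solution n)

-- ===== LEMMAS AND PROOFS =====

-- B's Euclid loop computes the gcd (for nonnegative arguments)
theorem gcdLoop_eq (g b : Int) (hg : 0 ≤ g) (hb : 0 ≤ b) :
    gcdLoop g b = (Int.gcd g b : Int) := by
  induction g, b using gcdLoop.induct with
  | case1 g => rw [gcdLoop]; simp [Int.gcd, Int.natAbs_of_nonneg hg]
  | case2 g b h ih =>
    have hbpos : 0 < b := lt_of_le_of_ne hb (Ne.symm h)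
    rw [gcdLoop]; simp only [h, dite_false]
    rw [PySem.Int.mod_eq_emod_of_pos hbpos]
    rw [PySem.Int.mod_eq_emod_of_pos hbpos] at ih
    rw [ih hb (Int.emod_nonneg g (by omega))]
    rw [Int.gcd_comm g b, Int.emod_def]
    simp

-- A's loop: the first multiple of both 6 and n at or above lcm is lcm(6,n)
theorem solutionLoop_eq (n : Int) (hn : n ≠ 0) (L : Int) (hL : L = (Int.lcm 6 n : Int))
    (fuel : Nat) : ∀ (lcm : Int), 0 < lcm → lcm ≤ L → L - lcm < fuel →
    solutionLoop fuel n lcm = PySem.Int.floordiv L 6 := by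
  have hPL6 : (6 : Int) ∣ L := by rw [hL]; exact Int.dvd_lcm_left 6 n
  have hPLn : n ∣ L := by rw [hL]; exact Int.dvd_lcm_right 6 n
  induction fuel with
  | zero => intro lcm _ _ hf; omega
  | succ f ih =>
    intro lcm hpos hle hf
    rw [solutionLoop]
    by_cases hP : PySem.Int.mod lcm 6 = 0 ∧ PySem.Int.mod lcm n = 0
    · rw [if_pos hP]
      have h6 : (6:Int) ∣ lcm := (PySem.Int.mod_eq_zero_iff_dvd lcm 6).mp hP.1
      have hnd : n ∣ lcm := (PySem.Int.mod_eq_zero_iff_dvd lcm n).mp hP.2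
      have hcast : lcm = ((lcm.toNat : Nat) : Int) := by omega
      have hLd : L ∣ lcm := by
        rw [hL, hcast]
        exact_mod_cast Int.lcm_dvd (c := lcm.toNat) (by rw [← hcast]; exact h6)
          (by rw [← hcast]; exact hnd)
      have : L ≤ lcm := Int.le_of_dvd hpos hLd
      have heq : lcm = L := le_antisymm hle this
      rw [heq]
    · rw [if_neg hP]
      have hne : lcm ≠ L := by
        intro h; apply hP; rw [h]
        exact ⟨(PySem.Int.mod_eq_zero_iff_dvd L 6).mpr hPL6,
               (PySem.Int.mod_eq_zero_iff_dvd L n).mpr hPLn⟩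
      exact ih (lcm + 1) (by omega) (by omega) (by omega)

-- the arithmetic core: lcm(6,a)/6 = a/gcd(a,6)
theorem nat_div_eq (a : Nat) : Nat.lcm 6 a / 6 = a / Nat.gcd a 6 := by
  have hg : 0 < Nat.gcd 6 a := Nat.gcd_pos_of_pos_left a (by norm_num)
  have h6 : Nat.lcm 6 a = 6 * (Nat.lcm 6 a / 6) := (Nat.mul_div_cancel' (Nat.dvd_lcm_left 6 a)).symm
  have ha : a = Nat.gcd 6 a * (a / Nat.gcd 6 a) := (Nat.mul_div_cancel' (Nat.gcd_dvd_right 6 a)).symm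
  have LG : Nat.gcd 6 a * Nat.lcm 6 a = 6 * a := Nat.gcd_mul_lcm 6 a
  rw [Nat.gcd_comm a 6]
  apply Nat.eq_of_mul_eq_mul_left (show 0 < 6 * Nat.gcd 6 a by omega)
  calc 6 * Nat.gcd 6 a * (Nat.lcm 6 a / 6)
      = Nat.gcd 6 a * (6 * (Nat.lcm 6 a / 6)) := by ring
    _ = Nat.gcd 6 a * Nat.lcm 6 a := by rw [← h6]
    _ = 6 * a := LG
    _ = 6 * (Nat.gcd 6 a * (a / Nat.gcd 6 a)) := by rw [← ha]
    _ = 6 * Nat.gcd 6 a * (a / Nat.gcd 6 a) := by ring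

-- ===== VERDICT (by name: the statement is the Claim_ definition above) =====
theorem solution_spec : Claim_equal_solution := by
  intro n _ hn
  unfold Spec_solution solution solution_alt
  have hn' : n ≠ 0 := hn
  set a : Nat := n.natAbs with haDef
  have hapos : 0 < a := Int.natAbs_pos.mpr hn'
  have habs : |n| = (a : Int) := by rw [haDef]; exact Int.abs_eq_natAbs n
  -- the A side
  have hLnat : Int.lcm 6 n = Nat.lcm 6 a := by
    unfold Int.lcm; rw [haDef]; norm_num
  have hLpos : 0 < Nat.lcm 6 a := Nat.pos_of_ne_zero (Nat.lcm_ne_zero (by norm_num) (by omega))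
  have hLle : Nat.lcm 6 a ≤ 6 * a := Nat.le_of_dvd (by omega)
    (Nat.lcm_dvd ⟨a, rfl⟩ ⟨6, by ring⟩)
  have hA : solutionLoop (6 * a) n 1 = PySem.Int.floordiv ((Nat.lcm 6 a : Nat) : Int) 6 := by
    apply solutionLoop_eq n hn' _ (by rw [hLnat]) _ 1 (by norm_num) (by exact_mod_cast hLpos)
    push_cast; omega
  rw [hA]
  simp only []
  show _ = PySem.Int.floordiv |n| (gcdLoop |n| 6)
  -- the B side
  rw [habs, gcdLoop_eq _ _ (by positivity) (by norm_num)]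
  have hgcd : Int.gcd (a : Int) 6 = Nat.gcd a 6 := by unfold Int.gcd; norm_num
  rw [hgcd]
  have h1 : PySem.Int.floordiv ((Nat.lcm 6 a : Nat) : Int) 6 = ((Nat.lcm 6 a / 6 : Nat) : Int) := by
    exact_mod_cast PySem.Int.floordiv_natCast (Nat.lcm 6 a) 6
  have h2 : PySem.Int.floordiv ((a : Nat) : Int) ((Nat.gcd a 6 : Nat) : Int)
      = ((a / Nat.gcd a 6 : Nat) : Int) := PySem.Int.floordiv_natCast a (Nat.gcd a 6)
  rw [h1, h2, nat_div_eq a]
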